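-- pv_equiv track=rewrite | github.com/microsoft/vscode | src/vs/platform/snc/node/visualizers/string_visualizer.py | build_string_to_internal_mapping
-- ===== SOURCE A (Python) =====
-- from typing import List, Tuple, Any
--
-- def build_string_to_internal_mapping(string_value: str) -> List[int]:
--     """
--     Build a mapping from string character indices to internal visualizer indices.
--
--     This is the inverse of build_internal_to_string_mapping.
--
--     For each character position in the original string, returns the internal index
--     where that character is displayed. For newlines, returns the index of the \\n
--     display element (not the $ or ^ anchors).
--
--     Returns a list where mapping[string_idx] = internal_idx.
--     Also appends one extra entry for the end position (len(string)).
--     """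
--     mapping = []
--
--     internal_idx = 2  # Start after \A (0) and ^ (1)
--
--     for char in string_value:
--         if char == '\n':
--             # \n expands to: $ (internal_idx), \n (internal_idx+1), ^ (internal_idx+2)
--             # Map the string's \n to the \n display element (middle one)
--             mapping.append(internal_idx + 1)
--             internal_idx += 3
--         else:
--             # Regular character (including \t which displays as single element)
--             mapping.append(internal_idx)
--             internal_idx += 1
--
--     # End position maps to $ anchor at the end
--     mapping.append(internal_idx)
--
--     return mapping
-- ===== SOURCE B (Python) =====
-- def build_string_to_internal_mapping(string_value):
--     # Build the mapping BACK-TO-FRONT: compute the final internal index (the end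
--     # anchor position) in closed form from the display widths, then walk the
--     # string in reverse, prepending each character's display index.
--     end = 2 + sum(3 if c == '\n' else 1 for c in string_value)
--     out = [end]
--     idx = end
--     for c in reversed(string_value):
--         idx -= 3 if c == '\n' else 1
--         out.append(idx + 1 if c == '\n' else idx)
--     out.reverse()
--     return out
-- ===== Notes on version B (the rewrite author's own statement) =====
-- stated objective: alternative
-- what changed: Builds the output back-to-front: the end index is computed first in closed form as 2 plus the sum of display widths, then a reverse walk over the string emits entries from the last character to the first and a final reverse yields the mapping, instead of A's forward loop with a running counter appending as it goes.
import Mathlib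
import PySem

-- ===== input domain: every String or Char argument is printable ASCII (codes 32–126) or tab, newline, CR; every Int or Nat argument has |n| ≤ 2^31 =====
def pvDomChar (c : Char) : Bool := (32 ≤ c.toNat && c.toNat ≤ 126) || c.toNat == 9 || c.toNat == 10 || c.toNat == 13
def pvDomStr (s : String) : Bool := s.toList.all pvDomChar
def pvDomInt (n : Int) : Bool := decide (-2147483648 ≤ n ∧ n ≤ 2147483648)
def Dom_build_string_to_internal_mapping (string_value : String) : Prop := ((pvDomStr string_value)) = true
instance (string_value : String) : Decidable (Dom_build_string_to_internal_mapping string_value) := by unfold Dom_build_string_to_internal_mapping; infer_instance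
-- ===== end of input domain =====

-- ===== PORT A =====
-- B builds the mapping back-to-front from a closed-form end index instead of A's forward running counter; objective: alternative.
def build_string_to_internal_mapping (string_value : String) : List Int :=
  let r := string_value.toList.foldl
    (fun (st : List Int × Int) (c : Char) =>
      if c = '\n' then (st.1 ++ [st.2 + 1], st.2 + 3)
      else (st.1 ++ [st.2], st.2 + 1)) ([], 2)
  r.1 ++ [r.2]

-- ===== PORT B =====
def build_string_to_internal_mapping_alt (string_value : String) : List Int :=
  let l := string_value.toList
  let endIdx : Int := 2 + (l.map (fun c => if c = '\n' then (3 : Int) else 1)).sum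
  let r := l.reverse.foldl
    (fun (st : List Int × Int) (c : Char) =>
      let idx := st.2 - (if c = '\n' then 3 else 1)
      (st.1 ++ [if c = '\n' then idx + 1 else idx], idx)) ([endIdx], endIdx)
  r.1.reverse

-- ===== PRECONDITION & SPEC =====
def Spec_build_string_to_internal_mapping (string_value : String) (out : List Int) : Prop := out = build_string_to_internal_mapping_alt string_value
instance (string_value : String) (out : List Int) : Decidable (Spec_build_string_to_internal_mapping string_value out) := by unfold Spec_build_string_to_internal_mapping; infer_instance

-- ===== CLAIM (what is proved, stated in full; the proofs are below) =====
def Claim_equal_build_string_to_internal_mapping : Prop := ∀ (string_value : String), Dom_build_string_to_internal_mapping string_value → Spec_build_string_to_internal_mapping string_value (build_string_to_internal_mapping string_value)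

-- ===== LEMMAS AND PROOFS =====
-- reference mapping: entries seeded at i, recursive on the characters
def pvM : List Char → Int → List Int
  | [], i => [i]
  | c :: t, i =>
      (if c = '\n' then i + 1 else i) :: pvM t (i + (if c = '\n' then 3 else 1))

def pvW (l : List Char) : Int := (l.map (fun c => if c = '\n' then (3 : Int) else 1)).sum

theorem pv_A (l : List Char) : ∀ (i : Int) (acc : List Int),
    (let r := l.foldl
        (fun (st : List Int × Int) (c : Char) =>
          if c = '\n' then (st.1 ++ [st.2 + 1], st.2 + 3)
          else (st.1 ++ [st.2], st.2 + 1)) (acc, i)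
     r.1 ++ [r.2]) = acc ++ pvM l i := by
  induction l with
  | nil => intro i acc; simp [pvM]
  | cons c t ih =>
    intro i acc
    by_cases hc : c = '\n'
    · simp [hc, pvM, ih]
    · simp [hc, pvM, ih]

theorem pv_B (l : List Char) : ∀ (i : Int),
    l.foldr
      (fun (c : Char) (st : List Int × Int) =>
        let idx := st.2 - (if c = '\n' then 3 else 1)
        (st.1 ++ [if c = '\n' then idx + 1 else idx], idx))
      ([i + pvW l], i + pvW l)
    = ((pvM l i).reverse, i) := by
  induction l with
  | nil => intro i; simp [pvW, pvM]
  | cons c t ih =>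
    intro i
    have hw : i + pvW (c :: t) = (i + (if c = '\n' then 3 else 1)) + pvW t := by
      simp [pvW]; ring
    by_cases hc : c = '\n'
    · simp only [List.foldr_cons, hw, ih (i + (if c = '\n' then 3 else 1))]
      simp [hc, pvM]
    · simp only [List.foldr_cons, hw, ih (i + (if c = '\n' then 3 else 1))]
      simp [hc, pvM]

-- ===== VERDICT (by name: the statement is the Claim_ definition above) =====
theorem pv_keyA (s : String) : build_string_to_internal_mapping s = pvM s.toList 2 := by
  have h := pv_A s.toList 2 []
  simpa [build_string_to_internal_mapping] using h

theorem pv_keyB (s : String) : build_string_to_internal_mapping_alt s = pvM s.toList 2 := by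
  have h := pv_B s.toList 2
  simp only [pvW] at h
  simp only [build_string_to_internal_mapping_alt, List.foldl_reverse]
  rw [h]
  simp

theorem build_string_to_internal_mapping_spec : Claim_equal_build_string_to_internal_mapping := by
  intro s _
  unfold Spec_build_string_to_internal_mapping
  rw [pv_keyA, pv_keyB]
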